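-- pv_equiv track=rewrite | github.com/researchim-ai/models-at-home | homellm/training/sft.py | _segments_to_text_and_spans
-- ===== SOURCE A (Python) =====
-- from typing import Any, Dict, List, Optional, Union, Tuple
--
-- def _segments_to_text_and_spans(segments: List[Tuple[str, bool]]) -> Tuple[str, List[Tuple[int, int]]]:
--     """Склеивает сегменты в текст и возвращает char-spans для trainable частей."""
--     spans: List[Tuple[int, int]] = []
--     cur = 0
--     parts: List[str] = []
--     for seg_text, trainable in segments:
--         if not seg_text:
--             continue
--         parts.append(seg_text)
--         if trainable:
--             spans.append((cur, cur + len(seg_text)))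
--         cur += len(seg_text)
--     return "".join(parts), spans
-- ===== SOURCE B (Python) =====
-- from typing import List, Tuple
--
-- def _segments_to_text_and_spans(segments: List[Tuple[str, bool]]) -> Tuple[str, List[Tuple[int, int]]]:
--     """Filter empties, build text, build a cumulative-offset table, then read spans off it."""
--     kept = [(t, tr) for (t, tr) in segments if t]
--     text = "".join(t for t, _ in kept)
--     offsets = [0]
--     for t, _ in kept:
--         offsets.append(offsets[-1] + len(t))
--     spans = [(a, b) for (_, tr), a, b in zip(kept, offsets, offsets[1:]) if tr]
--     return text, spans
-- ===== Notes on version B (the rewrite author's own statement) =====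
-- stated objective: alternative
-- what changed: Replaces A's single interleaved offset-tracking loop with three separate passes: filter out empty segments, build a cumulative prefix-offset table, then emit spans by zipping kept segments with adjacent offset pairs.
import Mathlib
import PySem

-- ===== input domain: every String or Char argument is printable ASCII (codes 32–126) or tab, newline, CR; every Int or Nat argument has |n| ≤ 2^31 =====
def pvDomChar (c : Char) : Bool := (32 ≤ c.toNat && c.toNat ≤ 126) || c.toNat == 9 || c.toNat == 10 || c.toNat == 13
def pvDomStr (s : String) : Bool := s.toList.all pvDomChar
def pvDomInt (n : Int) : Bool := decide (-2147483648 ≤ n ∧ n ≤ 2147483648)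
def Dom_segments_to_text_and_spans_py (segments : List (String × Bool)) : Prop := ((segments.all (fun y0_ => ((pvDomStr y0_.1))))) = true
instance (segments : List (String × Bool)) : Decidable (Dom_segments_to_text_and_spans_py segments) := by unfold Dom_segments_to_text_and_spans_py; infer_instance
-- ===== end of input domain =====

-- B restructures A's single interleaved offset-tracking loop into three passes:
-- filter empties, build a cumulative prefix-offset table, read spans off adjacent offset pairs (objective: alternative).

-- ===== PORT A =====
-- A's loop over segments with state (spans, cur, parts); appended lists model Python's .append.
def segments_to_text_and_spans_py (segments : List (String × Bool)) : String × (List (Int × Int)) :=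
  let st := segments.foldl
    (fun (st : List (Int × Int) × Int × List String) seg =>
      if seg.1 = "" then st
      else
        ((if seg.2 then st.1 ++ [(st.2.1, st.2.1 + PySem.Str.len seg.1)] else st.1),
         st.2.1 + PySem.Str.len seg.1,
         st.2.2 ++ [seg.1]))
    ([], 0, [])
  (PySem.Str.join "" st.2.2, st.1)

-- ===== PORT B =====
-- the offsets loop of Source B: offsets = [0]; for t,_ in kept: offsets.append(offsets[-1] + len(t))
def pvOffsets (cur : Int) : List String → List Int
  | [] => [cur]
  | t :: ts => cur :: pvOffsets (cur + PySem.Str.len t) ts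

def segments_to_text_and_spans_py_alt (segments : List (String × Bool)) : String × (List (Int × Int)) :=
  let kept := segments.filter (fun p => p.1 ≠ "")
  let text := PySem.Str.join "" (kept.map (·.1))
  let offsets := pvOffsets 0 (kept.map (·.1))
  let spans := ((kept.zip (offsets.zip offsets.tail)).filter (fun x => x.1.2)).map (·.2)
  (text, spans)

-- ===== PRECONDITION & SPEC =====
def Spec_segments_to_text_and_spans_py (segments : List (String × Bool)) (out : String × (List (Int × Int))) : Prop := out = segments_to_text_and_spans_py_alt segments
instance (segments : List (String × Bool)) (out : String × (List (Int × Int))) : Decidable (Spec_segments_to_text_and_spans_py segments out) := by unfold Spec_segments_to_text_and_spans_py; infer_instance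

-- ===== CLAIM (what is proved, stated in full; the proofs are below) =====
def Claim_equal_segments_to_text_and_spans_py : Prop := ∀ (segments : List (String × Bool)), Dom_segments_to_text_and_spans_py segments → Spec_segments_to_text_and_spans_py segments (segments_to_text_and_spans_py segments)

-- ===== LEMMAS AND PROOFS =====

def pvSpansOf (kept : List (String × Bool)) (offsets : List Int) : List (Int × Int) :=
  ((kept.zip (offsets.zip offsets.tail)).filter (fun x => x.1.2)).map (·.2)

theorem pvOffsets_eq_cons (cur : Int) (ts : List String) :
    pvOffsets cur ts = cur :: (pvOffsets cur ts).tail := by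
  cases ts <;> simp [pvOffsets]

theorem pvSpansOf_cons (t : String) (tr : Bool) (kept : List (String × Bool)) (cur : Int) :
    pvSpansOf ((t, tr) :: kept) (pvOffsets cur (t :: kept.map (·.1)))
      = (if tr then [(cur, cur + PySem.Str.len t)] else [])
        ++ pvSpansOf kept (pvOffsets (cur + PySem.Str.len t) (kept.map (·.1))) := by
  rw [pvSpansOf, pvOffsets]
  rw [pvOffsets_eq_cons (cur + PySem.Str.len t) (kept.map (·.1))]
  cases tr <;> simp [pvSpansOf, List.zip]

theorem foldA_eq (l : List (String × Bool)) :
    ∀ (cur : Int) (spans : List (Int × Int)) (parts : List String),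
    l.foldl
      (fun (st : List (Int × Int) × Int × List String) seg =>
        if seg.1 = "" then st
        else
          ((if seg.2 then st.1 ++ [(st.2.1, st.2.1 + PySem.Str.len seg.1)] else st.1),
           st.2.1 + PySem.Str.len seg.1,
           st.2.2 ++ [seg.1]))
      (spans, cur, parts)
    = (spans ++ pvSpansOf (l.filter (fun p => p.1 ≠ "")) (pvOffsets cur ((l.filter (fun p => p.1 ≠ "")).map (·.1))),
       cur + ((l.filter (fun p => p.1 ≠ "")).map (fun p => PySem.Str.len p.1)).sum,
       parts ++ (l.filter (fun p => p.1 ≠ "")).map (·.1)) := by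
  induction l with
  | nil => intro cur spans parts; simp [pvSpansOf, pvOffsets]
  | cons hd tl ih =>
    intro cur spans parts
    obtain ⟨t, tr⟩ := hd
    by_cases ht : t = ""
    · subst ht
      simp only [List.foldl_cons, if_pos (rfl : ("":String) = "")]
      rw [ih]
      simp
    · simp only [List.foldl_cons, if_neg ht]
      rw [ih]
      have hf : ((t, tr) :: tl).filter (fun p => p.1 ≠ "") =
          (t, tr) :: tl.filter (fun p => p.1 ≠ "") := by
        simp [ht]
      rw [hf]
      simp only [List.map_cons]
      rw [pvSpansOf_cons]
      cases tr <;> simp <;> ring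

-- ===== VERDICT (by name: the statement is the Claim_ definition above) =====
theorem segments_to_text_and_spans_py_spec : Claim_equal_segments_to_text_and_spans_py := by
  intro segments _
  unfold Spec_segments_to_text_and_spans_py
  unfold segments_to_text_and_spans_py segments_to_text_and_spans_py_alt
  rw [foldA_eq]
  simp [pvSpansOf]
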